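-- pv_equiv track=rewrite | github.com/andyhuang18/dase-practice-course | ch_2/question_1.py | max_product_partition
-- ===== SOURCE A (Python) =====
-- def max_product_partition(n):
--     # 创建一个列表来存储以每个i为和的最大乘积
--     max_product = [0] * (n + 1)
--
--     # 创建一个列表来存储生成最大乘积的正整数列表
--     max_product_list = [[] for _ in range(n + 1)]
--
--     # 初始条件
--     max_product[1] = 1
--     max_product_list[1] = [1]
--
--     # 计算每个i的最大乘积
--     for i in range(2, n + 1):
--         for j in range(1, i // 2 + 1):
--             # 计算以i为和的最大乘积，将其与当前最大值比较
--             product = max(j * max_product[i - j], j * (i - j))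
--             if product > max_product[i]:
--                 max_product[i] = product
--                 max_product_list[i] = max_product_list[i - j] + [j]
--
--     return max_product[n], max_product_list[n]
-- ===== SOURCE B (Python) =====
-- def max_product_partition(n):
--     if n < 1:
--         return (0, [])
--     # mp[i] = max product for sum i; choice[i] = first j attaining it
--     mp = [0, 1]
--     choice = [0, 0]
--     for i in range(2, n + 1):
--         best, pick = 0, 0
--         for j in range(1, i // 2 + 1):
--             p = max(j * mp[i - j], j * (i - j))
--             if p > best:
--                 best, pick = p, j
--         mp.append(best)
--         choice.append(pick)
--
--     def rebuild(i):
--         if i <= 1: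
--             return [1]
--         j = choice[i]
--         return rebuild(i - j) + [j]
--
--     return mp[n], rebuild(n)
-- ===== Notes on version B (the rewrite author's own statement) =====
-- stated objective: alternative
-- what changed: Instead of carrying a full partition list per DP cell, B stores only the first strictly-improving choice j per cell and reconstructs the partition by a single backward pass, appending DP rows instead of preallocating and mutating tables.
-- outside the precondition, e.g. on max_product_partition(0): A raises IndexError, B returns (0, []); on max_product_partition(-3): A raises IndexError, B returns (0, [])
import Mathlib
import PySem

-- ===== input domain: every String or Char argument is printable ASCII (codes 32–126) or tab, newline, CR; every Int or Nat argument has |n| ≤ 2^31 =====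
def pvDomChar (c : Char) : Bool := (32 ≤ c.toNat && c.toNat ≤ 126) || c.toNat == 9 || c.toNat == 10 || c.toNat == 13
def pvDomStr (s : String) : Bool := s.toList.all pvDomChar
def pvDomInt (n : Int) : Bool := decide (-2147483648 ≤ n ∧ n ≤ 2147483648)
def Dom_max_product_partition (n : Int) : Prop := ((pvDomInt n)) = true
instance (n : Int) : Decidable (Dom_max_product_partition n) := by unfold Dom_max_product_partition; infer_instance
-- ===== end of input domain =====

-- B replaces A's per-cell partition lists by a choice[] table plus a backward
-- reconstruction pass (objective: alternative decomposition; O(n) list memory instead of O(n²)).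

-- ===== PORT A =====
def pvA_step (i : Int) (st : List Int × List (List Int)) (j : Int) : List Int × List (List Int) :=
  let product := max (j * PySem.List.pyGetD st.1 (i - j) 0) (j * (i - j))
  if PySem.List.pyGetD st.1 i 0 < product then
    (PySem.List.pySetD st.1 i product,
     PySem.List.pySetD st.2 i (PySem.List.pyGetD st.2 (i - j) [] ++ [j]))
  else st

def pvA_outer (st : List Int × List (List Int)) (i : Int) : List Int × List (List Int) :=
  (PySem.List.pyRange 1 (PySem.Int.floordiv i 2 + 1) 1).foldl (pvA_step i) st

def max_product_partition (n : Int) : Int × List Int :=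
  let mp0 : List Int := PySem.List.pySetD (List.replicate (n + 1).toNat 0) 1 1
  let mpl0 : List (List Int) := PySem.List.pySetD (List.replicate (n + 1).toNat ([] : List Int)) 1 [1]
  let st := (PySem.List.pyRange 2 (n + 1) 1).foldl pvA_outer (mp0, mpl0)
  (PySem.List.pyGetD st.1 n 0, PySem.List.pyGetD st.2 n [])

-- ===== PORT B =====
def pvB_step (v : Int → Int) (i : Int) (bp : Int × Int) (j : Int) : Int × Int :=
  let p := max (j * v j) (j * (i - j))
  if bp.1 < p then (p, j) else bp

def pvB_best (mp : List Int) (i : Int) : Int × Int :=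
  (PySem.List.pyRange 1 (PySem.Int.floordiv i 2 + 1) 1).foldl
    (pvB_step (fun j => PySem.List.pyGetD mp (i - j) 0) i) (0, 0)

def pvB_rebuild (choice : List Int) : Nat → Int → List Int
  | 0, _ => [1]
  | fuel + 1, i =>
    if i ≤ 1 then [1]
    else
      let j := PySem.List.pyGetD choice i 0
      pvB_rebuild choice fuel (i - j) ++ [j]

def pvB_outer (st : List Int × List Int) (i : Int) : List Int × List Int :=
  let bp := pvB_best st.1 i
  (st.1 ++ [bp.1], st.2 ++ [bp.2])

def max_product_partition_alt (n : Int) : Int × List Int :=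
  if n < 1 then (0, [])
  else
    let st := (PySem.List.pyRange 2 (n + 1) 1).foldl pvB_outer ([0, 1], [0, 0])
    (PySem.List.pyGetD st.1 n 0, pvB_rebuild st.2 n.toNat n)

-- ===== PRECONDITION & SPEC =====
-- A raises IndexError for every n ≤ 0 (the table has no cell 1); Pre_ keeps exactly the inputs where A returns.
def Pre_max_product_partition (n : Int) : Prop := 1 ≤ n
instance (n : Int) : Decidable (Pre_max_product_partition n) := by unfold Pre_max_product_partition; infer_instance
def pvWitness_max_product_partition : Int := 5

def Spec_max_product_partition (n : Int) (out : Int × List Int) : Prop := out = max_product_partition_alt n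
instance (n : Int) (out : Int × List Int) : Decidable (Spec_max_product_partition n out) := by unfold Spec_max_product_partition; infer_instance

-- ===== CLAIM (what is proved, stated in full; the proofs are below) =====
def Claim_equal_max_product_partition : Prop := ∀ (n : Int), Dom_max_product_partition n → Pre_max_product_partition n → Spec_max_product_partition n (max_product_partition n)

-- ===== LEMMAS AND PROOFS =====

-- combined value+list inner fold (proof-side abstraction of A's inner loop at cell i,
-- reading mp[i-j] through v and the partition list mpl[i-j] through w)
def pvF (v : Int → Int) (w : Int → List Int) (i : Int) (st : Int × List Int) (j : Int) : Int × List Int :=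
  let p := max (j * v j) (j * (i - j))
  if st.1 < p then (p, w j ++ [j]) else st

def pvAinit (n : Int) : List Int × List (List Int) :=
  (PySem.List.pySetD (List.replicate (n + 1).toNat 0) 1 1,
   PySem.List.pySetD (List.replicate (n + 1).toNat ([] : List Int)) 1 [1])

def pvAfold (n : Int) (m : Nat) : List Int × List (List Int) :=
  (PySem.List.pyRange 2 ((m : Int) + 1) 1).foldl pvA_outer (pvAinit n)

def pvBfold (m : Nat) : List Int × List Int :=
  (PySem.List.pyRange 2 ((m : Int) + 1) 1).foldl pvB_outer ([0, 1], [0, 0])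

def pvInv (n : Int) (m : Nat) : Prop :=
  (pvAfold n m).1.length = (n + 1).toNat ∧
  (pvAfold n m).2.length = (n + 1).toNat ∧
  (pvBfold m).1.length = m + 1 ∧
  (pvBfold m).2.length = m + 1 ∧
  (∀ k : Nat, k ≤ m → (pvAfold n m).1.getD k 0 = (pvBfold m).1.getD k 0) ∧
  (∀ k : Nat, m < k → (pvAfold n m).1.getD k 0 = 0 ∧ (pvAfold n m).2.getD k [] = []) ∧
  (∀ k : Nat, 2 ≤ k → k ≤ m → 1 ≤ (pvBfold m).2.getD k 0 ∧ (pvBfold m).2.getD k 0 < (k : Int)) ∧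
  (∀ k : Nat, 1 ≤ k → k ≤ m → ∀ fuel : Nat, k ≤ fuel + 1 →
      pvB_rebuild (pvBfold m).2 fuel (k : Int) = (pvAfold n m).2.getD k [])

-- small getD/set helpers
theorem pvGetD_set_eq {α : Type} (xs : List α) (iN : Nat) (v d : α) (h : iN < xs.length) :
    (xs.set iN v).getD iN d = v := by
  simp [List.getD, h]

theorem pvGetD_set_ne {α : Type} (xs : List α) (iN k : Nat) (v d : α) (h : k ≠ iN) :
    (xs.set iN v).getD k d = xs.getD k d := by
  simp [List.getD, List.getElem?_set_ne (by omega : iN ≠ k)]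

theorem pvSet_self {α : Type} (xs : List α) (iN : Nat) (v d : α)
    (h : iN < xs.length) (hv : xs.getD iN d = v) : xs.set iN v = xs := by
  apply List.ext_getElem?
  intro k
  rcases eq_or_ne k iN with rfl | hk
  · rw [List.getElem?_set_self h, List.getElem?_eq_getElem h, ← hv]
    simp [List.getD, List.getElem?_eq_getElem h]
  · rw [List.getElem?_set_ne (Ne.symm hk)]

theorem pvGetD_append_lt {α : Type} (xs : List α) (e d : α) (k : Nat) (h : k < xs.length) :
    (xs ++ [e]).getD k d = xs.getD k d := by
  simp [List.getD, List.getElem?_append_left h]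

theorem pvGetD_append_len {α : Type} (xs : List α) (e d : α) :
    (xs ++ [e]).getD xs.length d = e := by
  simp [List.getD]

theorem pvPyGetD_set_ne {α : Type} (xs : List α) (iN : Nat) (v d : α) (t : Int)
    (h0 : 0 ≤ t) (ht : t.toNat < xs.length) (hne : t.toNat ≠ iN) :
    PySem.List.pyGetD (xs.set iN v) t d = PySem.List.pyGetD xs t d := by
  rw [PySem.List.pyGetD_eq_getElem _ _ h0 (by simp [List.length_set]; omega),
      PySem.List.pyGetD_eq_getElem _ _ h0 (by omega)]
  exact List.getElem_set_ne (Ne.symm hne) _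

theorem pvPyGetD_set_eq {α : Type} (xs : List α) (iN : Nat) (v d : α) (t : Int)
    (h0 : 0 ≤ t) (ht : iN < xs.length) (heq : t.toNat = iN) :
    PySem.List.pyGetD (xs.set iN v) t d = v := by
  subst heq
  rw [PySem.List.pyGetD_eq_getElem _ _ h0 (by simp [List.length_set]; omega)]
  exact List.getElem_set_self _

-- A's inner loop, started with cell i holding (b, l), is the abstract fold pvF written back into cell i
theorem pvInnerA (i : Int) (v : Int → Int) (w : Int → List Int) (hi0 : 0 ≤ i)
    (mpA : List Int) (mplA : List (List Int))
    (hl1 : i.toNat < mpA.length) (hl2 : i.toNat < mplA.length) :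
    ∀ (js : List Int) (b : Int) (l : List Int),
    (∀ j ∈ js, 1 ≤ j ∧ j < i) →
    (∀ j ∈ js, PySem.List.pyGetD mpA (i - j) 0 = v j) →
    (∀ j ∈ js, PySem.List.pyGetD mplA (i - j) [] = w j) →
    js.foldl (pvA_step i) (mpA.set i.toNat b, mplA.set i.toNat l) =
      (mpA.set i.toNat ((js.foldl (pvF v w i) (b, l)).1),
       mplA.set i.toNat ((js.foldl (pvF v w i) (b, l)).2)) := by
  intro js
  induction js with
  | nil => intro b l _ _ _; simp
  | cons j rest ih =>
    intro b l hjs hv hw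
    obtain ⟨hj1, hj2⟩ := hjs j (List.mem_cons_self ..)
    have hij0 : (0:Int) ≤ i - j := by omega
    have hr1 : PySem.List.pyGetD (mpA.set i.toNat b) (i - j) 0 = v j := by
      rw [pvPyGetD_set_ne mpA i.toNat b 0 (i - j) hij0 (by omega) (by omega)]
      exact hv j (List.mem_cons_self ..)
    have hr2 : PySem.List.pyGetD (mplA.set i.toNat l) (i - j) [] = w j := by
      rw [pvPyGetD_set_ne mplA i.toNat l [] (i - j) hij0 (by omega) (by omega)]
      exact hw j (List.mem_cons_self ..)
    have hr3 : PySem.List.pyGetD (mpA.set i.toNat b) i 0 = b :=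
      pvPyGetD_set_eq mpA i.toNat b 0 i hi0 hl1 rfl
    have hs1 : ∀ (xs : List Int) (v : Int), PySem.List.pySetD xs i v = xs.set i.toNat v :=
      fun xs v => PySem.List.pySetD_of_nonneg xs v hi0
    have hs2 : ∀ (xs : List (List Int)) (v : List Int), PySem.List.pySetD xs i v = xs.set i.toNat v :=
      fun xs v => PySem.List.pySetD_of_nonneg xs v hi0
    have hstep : pvA_step i (mpA.set i.toNat b, mplA.set i.toNat l) j =
        if b < max (j * v j) (j * (i - j)) then
          (mpA.set i.toNat (max (j * v j) (j * (i - j))),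
           mplA.set i.toNat (w j ++ [j]))
        else (mpA.set i.toNat b, mplA.set i.toNat l) := by
      simp only [pvA_step, hr1, hr2, hr3, hs1, hs2, List.set_set]
    have hF : pvF v w i (b, l) j =
        if b < max (j * v j) (j * (i - j)) then (max (j * v j) (j * (i - j)), w j ++ [j])
        else (b, l) := by
      simp only [pvF]
    simp only [List.foldl_cons, hstep, hF]
    split
    · exact ih _ _ (fun x hx => hjs x (List.mem_cons_of_mem _ hx))
        (fun x hx => hv x (List.mem_cons_of_mem _ hx))
        (fun x hx => hw x (List.mem_cons_of_mem _ hx))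
    · exact ih _ _ (fun x hx => hjs x (List.mem_cons_of_mem _ hx))
        (fun x hx => hv x (List.mem_cons_of_mem _ hx))
        (fun x hx => hw x (List.mem_cons_of_mem _ hx))

-- the picked j of B's inner fold is the initial pick or a member of js
theorem pvPick_cases (js : List Int) (v : Int → Int) (i : Int) :
    ∀ (b p : Int), (js.foldl (pvB_step v i) (b, p)).2 = p ∨ (js.foldl (pvB_step v i) (b, p)).2 ∈ js := by
  induction js with
  | nil => intro b p; left; rfl
  | cons j rest ih =>
    intro b p
    have hstep : pvB_step v i (b, p) j =
        if b < max (j * v j) (j * (i - j)) then (max (j * v j) (j * (i - j)), j) else (b, p) := by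
      simp only [pvB_step]
    simp only [List.foldl_cons, hstep]
    split
    · rcases ih (max (j * v j) (j * (i - j))) j with h | h
      · right; rw [h]; exact List.mem_cons_self ..
      · right; exact List.mem_cons_of_mem _ h
    · rcases ih b p with h | h
      · left; exact h
      · right; exact List.mem_cons_of_mem _ h

-- pvF is pvB_step plus the list read off the final pick
theorem pvFB (js : List Int) (v : Int → Int) (w : Int → List Int) (i : Int) :
    ∀ (b p : Int) (l : List Int), (∀ x ∈ js, x ≠ p) → js.Nodup →
    js.foldl (pvF v w i) (b, l) =
      ((js.foldl (pvB_step v i) (b, p)).1,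
       if (js.foldl (pvB_step v i) (b, p)).2 = p then l
       else w (js.foldl (pvB_step v i) (b, p)).2 ++ [(js.foldl (pvB_step v i) (b, p)).2]) := by
  induction js with
  | nil => intro b p l _ _; simp
  | cons j rest ih =>
    intro b p l hne hnd
    have hnd' : rest.Nodup := (List.nodup_cons.mp hnd).2
    have hjrest : j ∉ rest := (List.nodup_cons.mp hnd).1
    have hstepB : pvB_step v i (b, p) j =
        if b < max (j * v j) (j * (i - j)) then (max (j * v j) (j * (i - j)), j) else (b, p) := by
      simp only [pvB_step]
    have hstepF : pvF v w i (b, l) j =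
        if b < max (j * v j) (j * (i - j)) then (max (j * v j) (j * (i - j)), w j ++ [j])
        else (b, l) := by
      simp only [pvF]
    simp only [List.foldl_cons, hstepB, hstepF]
    split
    · rw [ih (max (j * v j) (j * (i - j))) j (w j ++ [j])
        (fun x hx => by rintro rfl; exact hjrest hx) hnd']
      rcases pvPick_cases rest v i (max (j * v j) (j * (i - j))) j with h | h
      · rw [h]; simp [hne j (List.mem_cons_self ..)]
      · have h1 : (rest.foldl (pvB_step v i) (max (j * v j) (j * (i - j)), j)).2 ≠ j :=
          fun he => hjrest (he ▸ h)
        have h2 : (rest.foldl (pvB_step v i) (max (j * v j) (j * (i - j)), j)).2 ≠ p :=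
          fun he => hne _ (List.mem_cons_of_mem _ h) he
        rw [if_neg h1, if_neg h2]
    · exact ih b p l (fun x hx => hne x (List.mem_cons_of_mem _ hx)) hnd'


def pvB_best' (v : Int → Int) (i : Int) : Int × Int :=
  (PySem.List.pyRange 1 (PySem.Int.floordiv i 2 + 1) 1).foldl (pvB_step v i) (0, 0)

-- with i ≥ 2 the first candidate j = 1 already improves on 0, so the final pick is in range
theorem pvPick_range (v : Int → Int) (i : Int) (h : 2 ≤ i) :
    1 ≤ (pvB_best' v i).2 ∧ (pvB_best' v i).2 < i := by
  unfold pvB_best'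
  rw [PySem.Int.floordiv_eq_ediv_of_pos (by norm_num)]
  rw [PySem.List.pyRange_one_cons (by omega : (1:Int) < i / 2 + 1)]
  simp only [List.foldl_cons]
  have h2 : (0:Int) < max (1 * v 1) (1 * (i - 1)) := by
    refine lt_of_lt_of_le ?_ (le_max_right _ _)
    rw [one_mul]; omega
  have hstep : pvB_step v i (0, 0) 1 = (max (1 * v 1) (1 * (i - 1)), 1) := by
    simp only [pvB_step, if_pos h2]
  rw [hstep]
  rcases pvPick_cases (PySem.List.pyRange (1 + 1) (i / 2 + 1)) v i
      (max (1 * v 1) (1 * (i - 1))) 1 with hc | hc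
  · rw [hc]; omega
  · have hm := PySem.List.mem_pyRange_one.mp hc
    omega

-- rebuild only reads entries below the length, so appending does not change it
theorem pvRebuild_append (c : List Int) (e : Int) :
    (∀ x : Nat, 2 ≤ x → x < c.length → 1 ≤ c.getD x 0 ∧ c.getD x 0 < (x : Int)) →
    ∀ (fuel : Nat) (k : Int), 0 ≤ k → k < (c.length : Int) →
    pvB_rebuild (c ++ [e]) fuel k = pvB_rebuild c fuel k := by
  intro hvalid fuel
  induction fuel with
  | zero => intro k _ _; rfl
  | succ fuel ih =>
    intro k h0 hlt
    by_cases hk : k ≤ 1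
    · simp [pvB_rebuild, hk]
    · have hread : PySem.List.pyGetD (c ++ [e]) k 0 = c.getD k.toNat 0 := by
        rw [PySem.List.pyGetD_eq_getElem _ _ h0 (by simp; omega)]
        rw [List.getElem_append_left (by omega)]
        simp [List.getD, List.getElem?_eq_getElem (show k.toNat < c.length by omega)]
      have hreadc : PySem.List.pyGetD c k 0 = c.getD k.toNat 0 := by
        rw [PySem.List.pyGetD_eq_getElem _ _ h0 (by omega)]
        simp [List.getD, List.getElem?_eq_getElem (show k.toNat < c.length by omega)]
      have hcv := hvalid k.toNat (by omega) (by omega)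
      simp only [pvB_rebuild, if_neg hk, hread, hreadc]
      congr 1
      exact ih (k - c.getD k.toNat 0) (by omega) (by omega)

theorem pvReplicate_getD {α : Type} (m k : Nat) (d : α) : (List.replicate m d).getD k d = d := by
  simp [List.getD, List.getElem?_replicate]
  split <;> rfl

theorem pvRebuild_one (c : List Int) (fuel : Nat) : pvB_rebuild c fuel 1 = [1] := by
  cases fuel with
  | zero => rfl
  | succ fuel => simp [pvB_rebuild]

theorem pvInv_base (n : Int) (h : 1 ≤ n) : pvInv n 1 := by
  have hset1 : ∀ {α : Type} (xs : List α) (v : α), PySem.List.pySetD xs 1 v = xs.set 1 v := by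
    intro α xs v
    rw [PySem.List.pySetD_of_nonneg _ _ (by norm_num)]
    norm_num
  have hA : pvAfold n 1 = pvAinit n := by
    unfold pvAfold
    rw [show (((1:Nat):Int) + 1) = 2 by norm_num, PySem.List.pyRange_one_eq_nil (le_refl 2)]
    rfl
  have hB : pvBfold 1 = ([0, 1], [0, 0]) := by
    unfold pvBfold
    rw [show (((1:Nat):Int) + 1) = 2 by norm_num, PySem.List.pyRange_one_eq_nil (le_refl 2)]
    rfl
  have h2 : 2 ≤ (n + 1).toNat := by omega
  unfold pvInv
  rw [hA, hB]
  unfold pvAinit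
  rw [hset1, hset1]
  refine ⟨by simp, by simp, rfl, rfl, ?_, ?_, ?_, ?_⟩
  · intro k hk
    interval_cases k
    · rw [pvGetD_set_ne _ _ _ _ _ (by omega), pvReplicate_getD]; rfl
    · rw [pvGetD_set_eq _ _ _ _ (by simp; omega)]; rfl
  · intro k hk
    constructor
    · rw [pvGetD_set_ne _ _ _ _ _ (by omega), pvReplicate_getD]
    · rw [pvGetD_set_ne _ _ _ _ _ (by omega), pvReplicate_getD]
  · intro k h2k hk1; omega
  · intro k hk1 hk2 fuel hfuel
    have hk : k = 1 := by omega
    subst hk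
    rw [show ((1:Nat):Int) = 1 by norm_num, pvRebuild_one,
        pvGetD_set_eq _ _ _ _ (by simp; omega)]

theorem pvPyGetD_toNat {α : Type} (xs : List α) (t : Int) (d : α) (h0 : 0 ≤ t) :
    PySem.List.pyGetD xs t d = xs.getD t.toNat d := by
  conv_lhs => rw [← Int.toNat_of_nonneg h0]
  rw [PySem.List.pyGetD_natCast]

theorem pvInv_step (n : Int) (m : Nat) (h1 : 1 ≤ m) (h2 : (m : Int) + 1 ≤ n)
    (ih : pvInv n m) : pvInv n (m + 1) := by
  obtain ⟨hA1, hA2, hB1, hB2, hEq, hZero, hChoice, hReb⟩ := ih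
  have hi0 : (0:Int) ≤ (m : Int) + 1 := by omega
  have hiN : ((m : Int) + 1).toNat = m + 1 := by omega
  have hlA1 : m + 1 < (pvAfold n m).1.length := by omega
  have hlA2 : m + 1 < (pvAfold n m).2.length := by omega
  -- the common inner index list and the common read functions
  have hjs : ∀ j ∈ PySem.List.pyRange 1 (PySem.Int.floordiv ((m : Int) + 1) 2 + 1),
      1 ≤ j ∧ j < (m : Int) + 1 := by
    intro j hj
    rw [PySem.Int.floordiv_eq_ediv_of_pos (by norm_num)] at hj
    have := PySem.List.mem_pyRange_one.mp hj
    omega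
  -- unfold one outer step on each side
  have hAf : pvAfold n (m + 1) = pvA_outer (pvAfold n m) ((m : Int) + 1) := by
    unfold pvAfold
    rw [show ((((m : Nat) + 1 : Nat) : Int) + 1) = ((m : Int) + 1) + 1 by push_cast; ring,
        PySem.List.pyRange_one_succ_right (by omega : (2:Int) ≤ (m : Int) + 1),
        List.foldl_append]
    rfl
  have hBf : pvBfold (m + 1) = pvB_outer (pvBfold m) ((m : Int) + 1) := by
    unfold pvBfold
    rw [show ((((m : Nat) + 1 : Nat) : Int) + 1) = ((m : Int) + 1) + 1 by push_cast; ring,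
        PySem.List.pyRange_one_succ_right (by omega : (2:Int) ≤ (m : Int) + 1),
        List.foldl_append]
    rfl
  -- B's inner fold equals the one reading through A's table
  have hvv : ∀ (acc : Int × Int) (j : Int),
      j ∈ PySem.List.pyRange 1 (PySem.Int.floordiv ((m : Int) + 1) 2 + 1) →
      pvB_step (fun j => PySem.List.pyGetD (pvBfold m).1 ((m : Int) + 1 - j) 0) ((m : Int) + 1) acc j =
      pvB_step (fun j => PySem.List.pyGetD (pvAfold n m).1 ((m : Int) + 1 - j) 0) ((m : Int) + 1) acc j := by
    intro acc j hj
    obtain ⟨hj1, hj2⟩ := hjs j hj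
    have hr : PySem.List.pyGetD (pvBfold m).1 ((m : Int) + 1 - j) 0 =
        PySem.List.pyGetD (pvAfold n m).1 ((m : Int) + 1 - j) 0 := by
      rw [pvPyGetD_toNat _ _ _ (by omega), pvPyGetD_toNat _ _ _ (by omega),
          hEq ((m : Int) + 1 - j).toNat (by omega)]
    simp only [pvB_step, hr]
  have hbp : pvB_best (pvBfold m).1 ((m : Int) + 1) =
      pvB_best' (fun j => PySem.List.pyGetD (pvAfold n m).1 ((m : Int) + 1 - j) 0) ((m : Int) + 1) := by
    unfold pvB_best pvB_best'
    exact PySem.List.foldl_congr_mem _ _ _ _ (fun acc x hx => hvv acc x hx)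
  -- notation for the winning pair
  have hpick := pvPick_range (fun j => PySem.List.pyGetD (pvAfold n m).1 ((m : Int) + 1 - j) 0)
      ((m : Int) + 1) (by omega)
  -- A's outer step written through pvInnerA + pvFB
  have hInner := pvInnerA ((m : Int) + 1)
      (fun j => PySem.List.pyGetD (pvAfold n m).1 ((m : Int) + 1 - j) 0)
      (fun j => PySem.List.pyGetD (pvAfold n m).2 ((m : Int) + 1 - j) []) hi0
      (pvAfold n m).1 (pvAfold n m).2 (by omega) (by omega)
      (PySem.List.pyRange 1 (PySem.Int.floordiv ((m : Int) + 1) 2 + 1)) 0 []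
      hjs (fun j _ => rfl) (fun j _ => rfl)
  have hFB := pvFB (PySem.List.pyRange 1 (PySem.Int.floordiv ((m : Int) + 1) 2 + 1))
      (fun j => PySem.List.pyGetD (pvAfold n m).1 ((m : Int) + 1 - j) 0)
      (fun j => PySem.List.pyGetD (pvAfold n m).2 ((m : Int) + 1 - j) []) ((m : Int) + 1)
      0 0 [] (fun x hx => by have := hjs x hx; omega) (PySem.List.nodup_pyRange_one _ _)
  have hP2ne : (pvB_best' (fun j => PySem.List.pyGetD (pvAfold n m).1 ((m : Int) + 1 - j) 0)
      ((m : Int) + 1)).2 ≠ 0 := by omega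
  have hbe : pvB_best' (fun j => PySem.List.pyGetD (pvAfold n m).1 ((m : Int) + 1 - j) 0)
      ((m : Int) + 1) =
      (PySem.List.pyRange 1 (PySem.Int.floordiv ((m : Int) + 1) 2 + 1)).foldl
        (pvB_step (fun j => PySem.List.pyGetD (pvAfold n m).1 ((m : Int) + 1 - j) 0) ((m : Int) + 1))
        (0, 0) := rfl
  rw [← hbe] at hFB
  rw [hFB, if_neg hP2ne] at hInner
  have hset0 : (pvAfold n m).1.set (((m : Int) + 1)).toNat (0:Int) = (pvAfold n m).1 :=
    pvSet_self _ _ _ 0 (by omega) (by rw [hiN]; exact (hZero (m + 1) (by omega)).1)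
  have hsetl : (pvAfold n m).2.set (((m : Int) + 1)).toNat ([] : List Int) = (pvAfold n m).2 :=
    pvSet_self _ _ _ [] (by omega) (by rw [hiN]; exact (hZero (m + 1) (by omega)).2)
  rw [hset0, hsetl] at hInner
  have hAstep : pvAfold n (m + 1) =
      ((pvAfold n m).1.set (m + 1)
         (pvB_best' (fun j => PySem.List.pyGetD (pvAfold n m).1 ((m : Int) + 1 - j) 0) ((m : Int) + 1)).1,
       (pvAfold n m).2.set (m + 1)
         (PySem.List.pyGetD (pvAfold n m).2
            ((m : Int) + 1 - (pvB_best' (fun j => PySem.List.pyGetD (pvAfold n m).1 ((m : Int) + 1 - j) 0) ((m : Int) + 1)).2) []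
          ++ [(pvB_best' (fun j => PySem.List.pyGetD (pvAfold n m).1 ((m : Int) + 1 - j) 0) ((m : Int) + 1)).2])) := by
    rw [hAf]
    unfold pvA_outer
    rw [← hiN]
    rw [hInner]
  have hBstep : pvBfold (m + 1) =
      ((pvBfold m).1 ++
         [(pvB_best' (fun j => PySem.List.pyGetD (pvAfold n m).1 ((m : Int) + 1 - j) 0) ((m : Int) + 1)).1],
       (pvBfold m).2 ++
         [(pvB_best' (fun j => PySem.List.pyGetD (pvAfold n m).1 ((m : Int) + 1 - j) 0) ((m : Int) + 1)).2]) := by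
    rw [hBf]
    unfold pvB_outer
    rw [hbp]
  -- abbreviate the winner
  generalize hPdef : pvB_best' (fun j => PySem.List.pyGetD (pvAfold n m).1 ((m : Int) + 1 - j) 0)
      ((m : Int) + 1) = P at hAstep hBstep hpick
  obtain ⟨hp1, hp2⟩ := hpick
  -- now the eight components
  unfold pvInv
  rw [hAstep, hBstep]
  refine ⟨by simpa using hA1, by simpa using hA2, by simp [hB1], by simp [hB2], ?_, ?_, ?_, ?_⟩
  · intro k hk
    rcases Nat.lt_or_ge k (m + 1) with hk' | hk'
    · rw [pvGetD_set_ne _ _ _ _ _ (by omega), pvGetD_append_lt _ _ _ _ (by omega),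
          hEq k (by omega)]
    · have hk2 : k = m + 1 := by omega
      subst hk2
      rw [pvGetD_set_eq _ _ _ _ (by omega), show m + 1 = (pvBfold m).1.length by omega,
          pvGetD_append_len]
  · intro k hk
    constructor
    · rw [pvGetD_set_ne _ _ _ _ _ (by omega)]
      exact (hZero k (by omega)).1
    · rw [pvGetD_set_ne _ _ _ _ _ (by omega)]
      exact (hZero k (by omega)).2
  · intro k hk2 hk
    rcases Nat.lt_or_ge k (m + 1) with hk' | hk'
    · rw [pvGetD_append_lt _ _ _ _ (by omega)]
      exact hChoice k hk2 (by omega)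
    · have hk3 : k = m + 1 := by omega
      subst hk3
      rw [show m + 1 = (pvBfold m).2.length by omega, pvGetD_append_len]
      constructor
      · exact hp1
      · rw [hB2]; push_cast; omega
  · intro k hk1 hk fuel hfuel
    have hvalid : ∀ x : Nat, 2 ≤ x → x < (pvBfold m).2.length →
        1 ≤ (pvBfold m).2.getD x 0 ∧ (pvBfold m).2.getD x 0 < (x : Int) := by
      intro x hx1 hx2
      exact hChoice x hx1 (by omega)
    rcases Nat.lt_or_ge k (m + 1) with hk' | hk'
    · rw [pvGetD_set_ne _ _ _ _ _ (by omega),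
          pvRebuild_append _ _ hvalid fuel (k : Int) (by omega) (by omega)]
      exact hReb k hk1 (by omega) fuel hfuel
    · have hk3 : k = m + 1 := by omega
      subst hk3
      obtain ⟨f, rfl⟩ : ∃ f, fuel = f + 1 := ⟨fuel - 1, by omega⟩
      have hread : PySem.List.pyGetD ((pvBfold m).2 ++ [P.2]) ((m + 1 : Nat) : Int) 0 = P.2 := by
        rw [PySem.List.pyGetD_natCast, show m + 1 = (pvBfold m).2.length by omega,
            pvGetD_append_len]
      have hrec : pvB_rebuild ((pvBfold m).2 ++ [P.2]) f (((m + 1 : Nat) : Int) - P.2) =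
          PySem.List.pyGetD (pvAfold n m).2 ((m : Int) + 1 - P.2) [] := by
        rw [pvRebuild_append _ _ hvalid f _ (by push_cast; omega) (by rw [hB2]; push_cast; omega)]
        have hkN : (((((m + 1 : Nat) : Int) - P.2).toNat : Int)) = ((m + 1 : Nat) : Int) - P.2 := by
          push_cast; omega
        rw [← hkN]
        rw [hReb (((m + 1 : Nat) : Int) - P.2).toNat (by push_cast at *; omega)
            (by push_cast at *; omega) f (by push_cast at *; omega)]
        rw [pvPyGetD_toNat _ _ _ (by omega)]
        congr 2
      have hrw : pvB_rebuild ((pvBfold m).2 ++ [P.2]) (f + 1) ((m + 1 : Nat) : Int) =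
          pvB_rebuild ((pvBfold m).2 ++ [P.2]) f (((m + 1 : Nat) : Int) - P.2) ++ [P.2] := by
        simp only [pvB_rebuild, hread]
        rw [if_neg (by push_cast; omega)]
      rw [hrw, hrec, pvGetD_set_eq _ _ _ _ (by omega)]

-- ===== VERDICT (by name: the statement is the Claim_ definition above) =====
theorem max_product_partition_spec : Claim_equal_max_product_partition := by
  intro n _ hpre
  unfold Spec_max_product_partition
  have hpre' : (1:Int) ≤ n := hpre
  have H : ∀ m : Nat, (m : Int) + 1 ≤ n → pvInv n (m + 1) := by
    intro m
    induction m with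
    | zero => intro _; exact pvInv_base n hpre'
    | succ m ih =>
      intro hle
      exact pvInv_step n (m + 1) (by omega) (by push_cast at hle ⊢; omega)
        (ih (by push_cast at hle ⊢; omega))
  have hcast : ((n.toNat : Nat) : Int) = n := Int.toNat_of_nonneg (by omega)
  have inv : pvInv n n.toNat := by
    rw [show n.toNat = (n.toNat - 1) + 1 by omega]
    exact H (n.toNat - 1) (by omega)
  obtain ⟨hA1, hA2, hB1, hB2, hEq, hZero, hChoice, hReb⟩ := inv
  have hAe : max_product_partition n =
      (PySem.List.pyGetD (pvAfold n n.toNat).1 n 0,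
       PySem.List.pyGetD (pvAfold n n.toNat).2 n []) := by
    simp only [max_product_partition, pvAfold, pvAinit, hcast]
  have hBe : max_product_partition_alt n =
      (PySem.List.pyGetD (pvBfold n.toNat).1 n 0, pvB_rebuild (pvBfold n.toNat).2 n.toNat n) := by
    simp only [max_product_partition_alt, pvBfold, hcast]
    rw [if_neg (by omega)]
  rw [hAe, hBe]
  have hreb := hReb n.toNat (by omega) (le_refl _) n.toNat (by omega)
  rw [hcast] at hreb
  congr 1
  · rw [pvPyGetD_toNat _ _ _ (by omega), pvPyGetD_toNat _ _ _ (by omega),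
        hEq n.toNat (le_refl _)]
  · rw [pvPyGetD_toNat _ _ _ (by omega)]
    exact hreb.symm
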